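-- pv_equiv track=rewrite | github.com/SonVH2511/CTFs | CTF_UIU2024/Summarize/sc.py | sub_40163D
-- ===== SOURCE A (Python) =====
-- def sub_40163D(a1, a2):
--     v9 = 0
--     v5 = 0
--     v6 = 0
--     for i in range(32):
--         v7 = a1 & 1
--         v8 = a2 & 1
--         a1 >>= 1
--         a2 >>= 1
--         v9 += ((v5 ^ v8 ^ v7) << v6) & 0xffffffff
--         v5 = v5 & v7 | v8 & v7 | v5 & v8
--         v6 += 1
--     return (((v5 << v6) & 0xffffffff) + v9) & 0xffffffff
-- ===== SOURCE B (Python) =====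
-- def sub_40163D(a1, a2):
--     # 32-bit wrap-around addition: Python's arbitrary-precision sum masked to the
--     # low 32 bits equals the ripple-carry result for any (also negative) inputs.
--     return (a1 + a2) & 0xffffffff
-- ===== Notes on version B (the rewrite author's own statement) =====
-- stated objective: faster
-- what changed: Replaced the 32-iteration per-bit ripple-carry loop (bit extraction, XOR sum, majority carry) by the closed-form (a1 + a2) & 0xffffffff, relying on modular arithmetic.
import Mathlib
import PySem

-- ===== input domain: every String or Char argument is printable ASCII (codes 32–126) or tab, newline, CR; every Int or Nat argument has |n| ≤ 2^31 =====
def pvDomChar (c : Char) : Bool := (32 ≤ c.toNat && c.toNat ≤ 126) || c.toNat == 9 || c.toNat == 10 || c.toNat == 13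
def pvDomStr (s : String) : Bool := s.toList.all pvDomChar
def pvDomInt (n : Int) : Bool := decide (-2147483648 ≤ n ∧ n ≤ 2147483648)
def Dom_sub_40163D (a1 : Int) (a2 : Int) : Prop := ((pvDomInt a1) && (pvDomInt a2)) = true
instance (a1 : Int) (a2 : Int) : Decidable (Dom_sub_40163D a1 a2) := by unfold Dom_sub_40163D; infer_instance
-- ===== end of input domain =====

-- B replaces A's 32-iteration per-bit ripple-carry loop by the closed form (a1 + a2) & 0xffffffff (constant-factor faster).


-- ===== PORT A =====
-- the body of A's `for i in range(32)` loop over the state (a1, a2, v9, v5, v6)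
def sub_40163D_step (st : Int × Int × Int × Int × Int) (_i : Nat) : Int × Int × Int × Int × Int :=
  let v7 := PySem.Int.band st.1 1
  let v8 := PySem.Int.band st.2.1 1
  let a1 := st.1 >>> (1:Nat)
  let a2 := st.2.1 >>> (1:Nat)
  let v9 := st.2.2.1 + PySem.Int.band ((PySem.Int.bxor (PySem.Int.bxor st.2.2.2.1 v8) v7) <<< st.2.2.2.2.toNat) 4294967295
  let v5 := PySem.Int.bor (PySem.Int.bor (PySem.Int.band st.2.2.2.1 v7) (PySem.Int.band v8 v7)) (PySem.Int.band st.2.2.2.1 v8)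
  (a1, a2, v9, v5, st.2.2.2.2 + 1)

def sub_40163D (a1 : Int) (a2 : Int) : Int :=
  let st := (List.range 32).foldl sub_40163D_step (a1, a2, 0, 0, 0)
  PySem.Int.band (PySem.Int.band (st.2.2.2.1 <<< st.2.2.2.2.toNat) 4294967295 + st.2.2.1) 4294967295

-- ===== PORT B =====
def sub_40163D_alt (a1 : Int) (a2 : Int) : Int :=
  PySem.Int.band (a1 + a2) 4294967295

-- ===== PRECONDITION & SPEC =====
def Spec_sub_40163D (a1 : Int) (a2 : Int) (out : Int) : Prop := out = sub_40163D_alt a1 a2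
instance (a1 : Int) (a2 : Int) (out : Int) : Decidable (Spec_sub_40163D a1 a2 out) := by unfold Spec_sub_40163D; infer_instance

-- ===== CLAIM (what is proved, stated in full; the proofs are below) =====
def Claim_equal_sub_40163D : Prop := ∀ (a1 : Int) (a2 : Int), Dom_sub_40163D a1 a2 → Spec_sub_40163D a1 a2 (sub_40163D a1 a2)

-- ===== LEMMAS AND PROOFS =====

-- Python's `z & 1` is `z % 2`, and `z = z % 2 + 2 * (z >> 1)` (floor shift), for every integer z.
theorem pv_split2 (z : Int) : PySem.Int.band z 1 = z % 2 ∧ z = z % 2 + 2 * (z >>> (1:Nat)) := by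
  rcases z with m | m
  · rw [Int.ofNat_eq_natCast]
    constructor
    · rw [show ((1:Int)) = ((1:Nat):Int) from rfl, PySem.Int.band_natCast, Nat.and_one_is_mod]
      omega
    · have h1 : ((m:Int)) >>> (1:Nat) = ((m >>> 1 : Nat) : Int) := rfl
      rw [h1, Nat.shiftRight_succ, Nat.shiftRight_zero]
      omega
  · have hneg : ¬ (0:Int) ≤ Int.negSucc m := by omega
    have hb : PySem.Int.band (Int.negSucc m) 1 = ((1 - (1 &&& ((-(Int.negSucc m) - 1).toNat)) : Nat) : Int) := by
      simp [PySem.Int.band, hneg]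
    have hm : (-(Int.negSucc m) - 1).toNat = m := by omega
    rw [hm, Nat.land_comm, Nat.and_one_is_mod] at hb
    have h1 : (Int.negSucc m) >>> (1:Nat) = Int.negSucc (m >>> 1) := rfl
    have h2 : m >>> 1 = m / 2 := by rw [Nat.shiftRight_succ, Nat.shiftRight_zero]
    exact ⟨by rw [hb]; omega, by rw [h1, h2]; omega⟩

-- Full-adder truth table: sum bit and carry bit of three input bits.
theorem pv_bit_tab (v5 v7 v8 : Int) (h5 : v5 = 0 ∨ v5 = 1) (h7 : v7 = 0 ∨ v7 = 1) (h8 : v8 = 0 ∨ v8 = 1) :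
    (PySem.Int.bxor (PySem.Int.bxor v5 v8) v7 = 0 ∨ PySem.Int.bxor (PySem.Int.bxor v5 v8) v7 = 1) ∧
    (PySem.Int.bor (PySem.Int.bor (PySem.Int.band v5 v7) (PySem.Int.band v8 v7)) (PySem.Int.band v5 v8) = 0 ∨
     PySem.Int.bor (PySem.Int.bor (PySem.Int.band v5 v7) (PySem.Int.band v8 v7)) (PySem.Int.band v5 v8) = 1) ∧
    v5 + v7 + v8 = 2 * (PySem.Int.bor (PySem.Int.bor (PySem.Int.band v5 v7) (PySem.Int.band v8 v7)) (PySem.Int.band v5 v8))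
      + PySem.Int.bxor (PySem.Int.bxor v5 v8) v7 := by
  rcases h5 with rfl | rfl <;> rcases h7 with rfl | rfl <;> rcases h8 with rfl | rfl <;> decide

-- `(s << n) & 0xffffffff = s * 2^n` for a bit s and n ≤ 31.
theorem pv_shift_mask (s : Int) (n : Nat) (hs : s = 0 ∨ s = 1) (hn : n ≤ 31) :
    PySem.Int.band (s <<< n) 4294967295 = s * 2 ^ n := by
  rcases hs with rfl | rfl
  · have h0 : (0:Int) <<< n = 0 := by simp
    rw [h0]
    simpa using PySem.Int.band_natCast 0 4294967295
  · have h1 : (1:Int) <<< n = ((2^n : Nat) : Int) := by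
      show ((1 <<< n : Nat) : Int) = _
      rw [Nat.one_shiftLeft]
    rw [h1, show (4294967295:Int) = ((4294967295:Nat):Int) from rfl, PySem.Int.band_natCast]
    have h2 : (2^n &&& 4294967295) = 2^n % 2^32 := Nat.and_two_pow_sub_one_eq_mod (2^n) 32
    rw [h2, Nat.mod_eq_of_lt (Nat.pow_lt_pow_right (by norm_num) (by omega))]
    push_cast; ring

-- Python's `z & 0xffffffff` is `z mod 2^32` for every integer z (also negative).
theorem pv_band_mask (z : Int) : PySem.Int.band z 4294967295 = z % 4294967296 := by
  by_cases h : 0 ≤ z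
  · rw [PySem.Int.band_of_nonneg h (by norm_num)]
    have h1 : (z.toNat &&& (4294967295:Int).toNat) = z.toNat % 2^32 := by
      have := Nat.and_two_pow_sub_one_eq_mod z.toNat 32
      simpa using this
    rw [h1]; omega
  · have hb : PySem.Int.band z 4294967295 = (((4294967295:Int).toNat - ((4294967295:Int).toNat &&& (-z - 1).toNat) : Nat) : Int) := by
      simp [PySem.Int.band, h]
    have hand : ((4294967295:Int).toNat &&& (-z - 1).toNat) = (-z - 1).toNat % 2^32 := by
      have := Nat.and_two_pow_sub_one_eq_mod ((-z - 1).toNat) 32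
      rw [Nat.land_comm]; simpa using this
    rw [hb, hand]; omega

-- Loop invariant of A: after n ≤ 32 iterations the shifted inputs, the partial sum v9
-- (the low n bits of a1+a2) and the carry v5 satisfy v9 + (v5 + a1>>n + a2>>n)·2^n = a1 + a2.
theorem pv_loop_inv (a1 a2 : Int) : ∀ n : Nat, n ≤ 32 →
    ∃ v9 v5 : Int,
      (List.range n).foldl sub_40163D_step (a1, a2, 0, 0, 0) = (a1 >>> n, a2 >>> n, v9, v5, (n : Int)) ∧
      (v5 = 0 ∨ v5 = 1) ∧ 0 ≤ v9 ∧ v9 < 2 ^ n ∧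
      v9 + (v5 + (a1 >>> n) + (a2 >>> n)) * 2 ^ n = a1 + a2 := by
  intro n
  induction n with
  | zero =>
    intro _
    refine ⟨0, 0, by simp, Or.inl rfl, le_refl 0, by norm_num, ?_⟩
    simp
  | succ n ih =>
    intro hn
    obtain ⟨v9, v5, hfold, hv5, h0, hlt, heq⟩ := ih (by omega)
    obtain ⟨hx7, hx⟩ := pv_split2 (a1 >>> n)
    obtain ⟨hy8, hy⟩ := pv_split2 (a2 >>> n)
    have h7 : PySem.Int.band (a1 >>> n) 1 = 0 ∨ PySem.Int.band (a1 >>> n) 1 = 1 := by rw [hx7]; omega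
    have h8 : PySem.Int.band (a2 >>> n) 1 = 0 ∨ PySem.Int.band (a2 >>> n) 1 = 1 := by rw [hy8]; omega
    obtain ⟨hs, hc, hsum⟩ := pv_bit_tab v5 (PySem.Int.band (a1 >>> n) 1) (PySem.Int.band (a2 >>> n) 1) hv5 h7 h8
    have hmask : PySem.Int.band
        ((PySem.Int.bxor (PySem.Int.bxor v5 (PySem.Int.band (a2 >>> n) 1)) (PySem.Int.band (a1 >>> n) 1)) <<< ((n : Int)).toNat)
        4294967295
        = (PySem.Int.bxor (PySem.Int.bxor v5 (PySem.Int.band (a2 >>> n) 1)) (PySem.Int.band (a1 >>> n) 1)) * 2 ^ n := by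
      rw [Int.toNat_natCast]; exact pv_shift_mask _ n hs (by omega)
    have hsr1 : (a1 >>> n) >>> (1:Nat) = a1 >>> (n + 1) := (Int.shiftRight_add a1 n 1).symm
    have hsr2 : (a2 >>> n) >>> (1:Nat) = a2 >>> (n + 1) := (Int.shiftRight_add a2 n 1).symm
    have hfold' : (List.range (n + 1)).foldl sub_40163D_step (a1, a2, 0, 0, 0)
        = (a1 >>> (n + 1), a2 >>> (n + 1),
           v9 + (PySem.Int.bxor (PySem.Int.bxor v5 (PySem.Int.band (a2 >>> n) 1)) (PySem.Int.band (a1 >>> n) 1)) * 2 ^ n,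
           PySem.Int.bor (PySem.Int.bor (PySem.Int.band v5 (PySem.Int.band (a1 >>> n) 1))
             (PySem.Int.band (PySem.Int.band (a2 >>> n) 1) (PySem.Int.band (a1 >>> n) 1)))
             (PySem.Int.band v5 (PySem.Int.band (a2 >>> n) 1)),
           ((n + 1 : Nat) : Int)) := by
      rw [List.range_succ, List.foldl_append, hfold, List.foldl_cons, List.foldl_nil]
      simp only [sub_40163D_step, hmask, hsr1, hsr2]
      push_cast; rfl
    have hx' : a1 >>> n = PySem.Int.band (a1 >>> n) 1 + 2 * (a1 >>> (n + 1)) := by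
      rw [hx7, ← hsr1]; exact hx
    have hy' : a2 >>> n = PySem.Int.band (a2 >>> n) 1 + 2 * (a2 >>> (n + 1)) := by
      rw [hy8, ← hsr2]; exact hy
    have hp : (0:Int) < 2 ^ n := by positivity
    have hpow : (2:Int) ^ (n + 1) = 2 * 2 ^ n := by ring
    refine ⟨_, _, hfold', hc, ?_, ?_, ?_⟩
    · rcases hs with hs' | hs' <;> rw [hs'] <;> omega
    · rw [hpow]; rcases hs with hs' | hs' <;> rw [hs'] <;> omega
    · rw [hpow]
      linear_combination heq - (2:Int) ^ n * hsum - (2:Int) ^ n * hx' - (2:Int) ^ n * hy'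

-- After the loop, (v5 << 32) & 0xffffffff vanishes.
theorem pv_carry_out (v5 : Int) (h : v5 = 0 ∨ v5 = 1) :
    PySem.Int.band (v5 <<< (32 : Nat)) 4294967295 = 0 := by
  rcases h with rfl | rfl
  · have h0 : (0:Int) <<< (32 : Nat) = 0 := by simp
    rw [h0]; simpa using PySem.Int.band_natCast 0 4294967295
  · have h1 : (1:Int) <<< (32 : Nat) = ((2^32 : Nat) : Int) := by
      show ((1 <<< 32 : Nat) : Int) = _
      rw [Nat.one_shiftLeft]
    rw [h1, show (4294967295:Int) = ((4294967295:Nat):Int) from rfl, PySem.Int.band_natCast]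
    have h2 : (2^32 &&& 4294967295) = 2^32 % 2^32 := Nat.and_two_pow_sub_one_eq_mod (2^32) 32
    rw [h2, Nat.mod_self]; rfl

-- ===== VERDICT (by name: the statement is the Claim_ definition above) =====
theorem sub_40163D_spec : Claim_equal_sub_40163D := by
  intro a1 a2 _
  obtain ⟨v9, v5, hfold, hv5, h0, hlt, heq⟩ := pv_loop_inv a1 a2 32 (le_refl 32)
  unfold Spec_sub_40163D sub_40163D sub_40163D_alt
  rw [hfold]
  simp only [Int.toNat_natCast]
  rw [pv_carry_out v5 hv5, zero_add, pv_band_mask, pv_band_mask]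
  have h32 : (2:Int) ^ (32:Nat) = 4294967296 := by norm_num
  rw [h32] at hlt heq
  omega
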